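-- pv_equiv track=rewrite | github.com/OstapOmelchuk/MyRepository | Class/Polygon_Class.py | sides_checker
-- ===== SOURCE A (Python) =====
-- def sides_checker(lst):
--     k = 0
--     for i in range(len(lst)):
--         if sum(lst)-lst[i] <= lst[i]:
--             k += 1
--     if k > 0:
--         return False
--     return True
-- ===== SOURCE B (Python) =====
-- def sides_checker(lst):
--     if not lst:
--         return True
--     return 2 * max(lst) < sum(lst)
-- ===== Notes on version B (the rewrite author's own statement) =====
-- stated objective: simpler
-- what changed: Replaces the per-index count of offending sides (each recomputing sum(lst)) with a closed-form test 2*max(lst) < sum(lst), since the polygon condition fails for some side iff it fails for the largest.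
import Mathlib
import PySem

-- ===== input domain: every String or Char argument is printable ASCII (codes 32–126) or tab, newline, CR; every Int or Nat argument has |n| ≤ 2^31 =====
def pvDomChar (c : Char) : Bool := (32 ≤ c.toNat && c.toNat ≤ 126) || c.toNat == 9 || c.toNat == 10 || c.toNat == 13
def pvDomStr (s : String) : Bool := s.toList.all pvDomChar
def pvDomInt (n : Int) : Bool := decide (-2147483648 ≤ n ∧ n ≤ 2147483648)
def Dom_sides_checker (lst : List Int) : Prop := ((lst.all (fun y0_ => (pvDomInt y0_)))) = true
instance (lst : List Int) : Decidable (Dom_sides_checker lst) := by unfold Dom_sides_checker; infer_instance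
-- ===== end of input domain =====

-- B replaces A's per-index count of offending sides (recomputing sum(lst) for each index)
-- with the closed-form test 2*max(lst) < sum(lst); exact same return value on every input.


-- ===== PORT A =====
-- k = 0; for i in range(len(lst)): if sum(lst)-lst[i] <= lst[i]: k += 1; return False if k > 0 else True
-- (lst[i]: index i drawn from range(len(lst)) is always in range, so pyGetD with default 0 is exact)
def sides_checker (lst : List Int) : Bool :=
  let k : Int :=
    (PySem.List.pyRange 0 (lst.length : Int) 1).foldl
      (fun k i =>
        if lst.sum - PySem.List.pyGetD lst i 0 ≤ PySem.List.pyGetD lst i 0 then k + 1 else k) 0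
  if k > 0 then false else true

-- ===== PORT B =====
-- if not lst: return True; return 2 * max(lst) < sum(lst)
def sides_checker_alt (lst : List Int) : Bool :=
  if lst.isEmpty then true
  else
    match PySem.List.max? lst (fun y => y) with
    | some m => decide (2 * m < lst.sum)
    | none => true  -- unreachable: lst is nonempty here

-- ===== PRECONDITION & SPEC =====
def Spec_sides_checker (lst : List Int) (out : Bool) : Prop := out = sides_checker_alt lst
instance (lst : List Int) (out : Bool) : Decidable (Spec_sides_checker lst out) := by unfold Spec_sides_checker; infer_instance

-- ===== CLAIM (what is proved, stated in full; the proofs are below) =====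
def Claim_equal_sides_checker : Prop := ∀ (lst : List Int), Dom_sides_checker lst → Spec_sides_checker lst (sides_checker lst)

-- ===== LEMMAS AND PROOFS =====

-- A's counter is the number of indices whose element v satisfies sum - v ≤ v.
theorem sides_checker_count (lst : List Int) :
    sides_checker lst =
      if (0 : Int) < (lst.countP (fun v => lst.sum - v ≤ v) : Int) then false else true := by
  unfold sides_checker
  rw [show (fun (k : Int) i =>
        if lst.sum - PySem.List.pyGetD lst i 0 ≤ PySem.List.pyGetD lst i 0 then k + 1 else k)
      = (fun (k : Int) i =>
        if (fun v => decide (lst.sum - v ≤ v)) (PySem.List.pyGetD lst i 0) = true then k + 1 else k)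
    from by funext k i; simp,
    PySem.List.foldl_pyRange_zero_pyGetD' lst 0
      (fun k v => if (fun v => decide (lst.sum - v ≤ v)) v = true then k + 1 else k) 0,
    PySem.List.foldl_count_if]
  simp

theorem sides_checker_spec' (lst : List Int) :
    sides_checker lst = sides_checker_alt lst := by
  rw [sides_checker_count]
  unfold sides_checker_alt
  match lst with
  | [] => simp
  | x :: t =>
    rw [PySem.List.max?_id_cons]
    simp only [List.isEmpty_cons, Bool.false_eq_true, if_false]
    have hmax := PySem.List.le_foldl_max t x
    have hmem : t.foldl max x = x ∨ t.foldl max x ∈ t := PySem.List.foldl_max_mem t x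
    by_cases h : 2 * t.foldl max x < (x :: t).sum
    · -- max is strictly small, so every element is: count is zero
      rw [if_neg, decide_eq_true h]
      have hc : (x :: t).countP (fun v => decide ((x :: t).sum - v ≤ v)) = 0 := by
        rw [List.countP_eq_zero]
        intro v hv
        have hvle : v ≤ t.foldl max x := by
          rcases List.mem_cons.mp hv with rfl | hvt
          · exact hmax.1
          · exact hmax.2 v hvt
        simp only [decide_eq_true_eq]
        omega
      rw [hc]
      simp
    · -- max itself offends: count is positive
      rw [if_pos, decide_eq_false h]
      have hm : t.foldl max x ∈ x :: t := by
        rcases hmem with he | ht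
        · rw [he]; exact List.mem_cons_self
        · exact List.mem_cons_of_mem x ht
      have hc : 0 < (x :: t).countP (fun v => decide ((x :: t).sum - v ≤ v)) := by
        rw [List.countP_pos_iff]
        exact ⟨t.foldl max x, hm, by simp only [decide_eq_true_eq]; omega⟩
      exact_mod_cast hc

-- ===== VERDICT (by name: the statement is the Claim_ definition above) =====
theorem sides_checker_spec : Claim_equal_sides_checker := by
  intro lst _
  unfold Spec_sides_checker
  exact sides_checker_spec' lst
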